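-- pv_equiv track=rewrite | github.com/rmgil/Stats-APP-V1-ISOLADO | app/stats/postflop_site_parsers.py | detect_preflop_allin
-- ===== SOURCE A (Python) =====
-- def detect_preflop_allin(hand_text: str) -> bool:
--     """Check for all-ins before flop"""
--     lines = hand_text.split('\n')
--     found_hole_cards = False
--
--     for line in lines:
--         if '** Dealing down cards **' in line or '*** HOLE CARDS ***' in line:
--             found_hole_cards = True
--         elif '** Dealing flop **' in line or '*** FLOP ***' in line:
--             return False
--         elif found_hole_cards and 'all in' in line.lower():
--             return True
--     return False
-- ===== SOURCE B (Python) =====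
-- def detect_preflop_allin(hand_text: str) -> bool:
--     """Check for all-ins before flop: locate the hole-cards and flop boundary
--     lines, then look for an all-in strictly between them."""
--     lines = hand_text.split('\n')
--     hole = next((i for i, line in enumerate(lines)
--                  if '** Dealing down cards **' in line or '*** HOLE CARDS ***' in line),
--                 None)
--     if hole is None:
--         return False
--     flop = next((i for i, line in enumerate(lines)
--                  if '** Dealing flop **' in line or '*** FLOP ***' in line),
--                 len(lines))
--     return any('all in' in line.lower() for line in lines[hole + 1:flop])
-- ===== Notes on version B (the rewrite author's own statement) =====
-- stated objective: alternative
-- what changed: Replaced A's single-pass found_hole_cards state machine with a locate-boundaries-then-check decomposition (find the first hole-cards line and the first flop line, then test the segment strictly between them for 'all in'); Pre_ excludes texts where one line contains a hole-cards marker together with a flop marker or the substring 'all in', since there A's elif precedence on that multi-marker line is accidental and either reading is defensible.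
-- outside the precondition, e.g. on detect_preflop_allin('*** HOLE CARDS ***\nx all in *** HOLE CARDS ***'): A returns False, B returns True; on detect_preflop_allin('*** HOLE CARDS *** and *** FLOP ***\nhero is all in'): A returns True, B returns False
import Mathlib
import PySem

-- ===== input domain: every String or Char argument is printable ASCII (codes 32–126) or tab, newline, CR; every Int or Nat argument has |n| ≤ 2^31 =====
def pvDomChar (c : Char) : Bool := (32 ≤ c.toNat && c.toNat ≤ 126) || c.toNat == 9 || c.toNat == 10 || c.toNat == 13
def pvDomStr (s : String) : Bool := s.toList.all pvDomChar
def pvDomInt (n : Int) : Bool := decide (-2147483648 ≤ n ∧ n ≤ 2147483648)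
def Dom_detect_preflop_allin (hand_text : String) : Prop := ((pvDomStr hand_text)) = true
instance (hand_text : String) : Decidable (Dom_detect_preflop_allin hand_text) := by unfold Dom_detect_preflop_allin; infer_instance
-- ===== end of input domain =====

-- B recomputes the same result by locating the first hole-cards line and the first
-- flop line, then checking the segment strictly between them; return value only.

-- marker predicates: the literal substring tests both Source A and Source B perform
def pvHole (line : String) : Bool :=
  PySem.Str.isIn "** Dealing down cards **" line || PySem.Str.isIn "*** HOLE CARDS ***" line

def pvFlop (line : String) : Bool :=
  PySem.Str.isIn "** Dealing flop **" line || PySem.Str.isIn "*** FLOP ***" line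

def pvAllin (line : String) : Bool :=
  PySem.Str.isIn "all in" (PySem.Str.lower line)

-- ===== PORT A =====
-- A's for-loop over the lines with its found_hole_cards flag and early returns
def pvScanA : List String → Bool → Bool
  | [], _ => false
  | line :: rest, found =>
    if pvHole line then pvScanA rest true
    else if pvFlop line then false
    else if found && pvAllin line then true
    else pvScanA rest found

def detect_preflop_allin (hand_text : String) : Bool :=
  pvScanA ((PySem.Str.split? hand_text "\n").getD []) false

-- ===== PORT B =====
def detect_preflop_allin_alt (hand_text : String) : Bool :=
  let lines := (PySem.Str.split? hand_text "\n").getD []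
  -- hole = next((i for i, line in enumerate(lines) if hole marker in line), None)
  match lines.findIdx? (fun line => pvHole line) with
  | none => false
  | some hole =>
    -- flop = next((i for i, line in enumerate(lines) if flop marker in line), len(lines))
    let flop := (lines.findIdx? (fun line => pvFlop line)).getD lines.length
    -- any('all in' in line.lower() for line in lines[hole+1:flop])
    (PySem.List.slice lines (some ((hole + 1 : Nat) : Int)) (some ((flop : Nat) : Int))).any
      (fun line => pvAllin line)

-- ===== PRECONDITION & SPEC =====
-- Pre_ excludes texts where one line contains a hole-cards marker together with a flop
-- marker or the substring 'all in': on such a multi-marker line A's elif precedence is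
-- accidental and either reading is defensible.
def Pre_detect_preflop_allin (hand_text : String) : Prop :=
  ((PySem.Str.split? hand_text "\n").getD []).all
    (fun l => !(pvHole l && (pvFlop l || pvAllin l))) = true
instance (hand_text : String) : Decidable (Pre_detect_preflop_allin hand_text) := by
  unfold Pre_detect_preflop_allin; infer_instance

def pvWitness_detect_preflop_allin : String :=
  "*** HOLE CARDS ***\nHero raises\nVillain is all in\n*** FLOP ***"

def Spec_detect_preflop_allin (hand_text : String) (out : Bool) : Prop := out = detect_preflop_allin_alt hand_text
instance (hand_text : String) (out : Bool) : Decidable (Spec_detect_preflop_allin hand_text out) := by unfold Spec_detect_preflop_allin; infer_instance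

-- ===== CLAIM (what is proved, stated in full; the proofs are below) =====
def Claim_equal_detect_preflop_allin : Prop := ∀ (hand_text : String), Dom_detect_preflop_allin hand_text → Pre_detect_preflop_allin hand_text → Spec_detect_preflop_allin hand_text (detect_preflop_allin hand_text)

-- ===== LEMMAS AND PROOFS =====

-- take up to the first index where q holds = takeWhile (!q)
theorem pv_takeWhile_eq_take_findIdx {α : Type} (q : α → Bool) (xs : List α) :
    xs.takeWhile (fun x => !q x) = xs.take ((xs.findIdx? q).getD xs.length) := by
  induction xs with
  | nil => rfl
  | cons a l ih =>
    by_cases h : q a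
    · simp [List.findIdx?_cons, h]
    · simp [List.findIdx?_cons, h, ih]

-- once the flag is set, A scans up to the first flop line looking for 'all in'
-- (on lines satisfying the Pre_ condition, a hole-marker line is neither flop nor all-in)
theorem pv_scanA_true (ls : List String)
    (hp : ∀ l ∈ ls, pvHole l = true → pvFlop l = false ∧ pvAllin l = false) :
    pvScanA ls true = (ls.takeWhile (fun l => !pvFlop l)).any (fun l => pvAllin l) := by
  induction ls with
  | nil => rfl
  | cons l rest ih =>
    have ih' := ih (fun x hx => hp x (List.mem_cons_of_mem _ hx))
    by_cases hh : pvHole l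
    · obtain ⟨hf, ha⟩ := hp l (List.mem_cons_self ..) hh
      simp [pvScanA, hh, hf, ha, ih']
    · by_cases hf : pvFlop l
      · simp [pvScanA, hh, hf]
      · cases ha : pvAllin l <;> simp [pvScanA, hh, hf, ha, ih']

-- A's scan from the unset flag = B's boundary-segment characterisation
theorem pv_scanA_false (ls : List String)
    (hp : ∀ l ∈ ls, pvHole l = true → pvFlop l = false ∧ pvAllin l = false) :
    pvScanA ls false =
      match ls.findIdx? (fun l => pvHole l) with
      | none => false
      | some h =>
        ((ls.drop (h + 1)).take
            (((ls.findIdx? (fun l => pvFlop l)).getD ls.length) - (h + 1))).any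
          (fun l => pvAllin l) := by
  induction ls with
  | nil => rfl
  | cons l rest ih =>
    have hp' : ∀ x ∈ rest, pvHole x = true → pvFlop x = false ∧ pvAllin x = false :=
      fun x hx => hp x (List.mem_cons_of_mem _ hx)
    by_cases hh : pvHole l
    · obtain ⟨hf, _⟩ := hp l (List.mem_cons_self ..) hh
      rw [show pvScanA (l :: rest) false = pvScanA rest true by simp [pvScanA, hh]]
      rw [pv_scanA_true rest hp', pv_takeWhile_eq_take_findIdx]
      cases hq : rest.findIdx? (fun l => pvFlop l) <;>
        simp [List.findIdx?_cons, hh, hf, hq]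
    · by_cases hf : pvFlop l
      · rw [show pvScanA (l :: rest) false = false by simp [pvScanA, hh, hf]]
        cases hpidx : rest.findIdx? (fun l => pvHole l) <;>
          simp [List.findIdx?_cons, hh, hf, hpidx]
      · rw [show pvScanA (l :: rest) false = pvScanA rest false by simp [pvScanA, hh, hf]]
        rw [ih hp']
        cases hpidx : rest.findIdx? (fun l => pvHole l) <;>
          cases hq : rest.findIdx? (fun l => pvFlop l) <;>
            simp [List.findIdx?_cons, hh, hf, hpidx, hq, Nat.succ_sub_succ]

-- ===== VERDICT (by name: the statement is the Claim_ definition above) =====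
theorem detect_preflop_allin_spec : Claim_equal_detect_preflop_allin := by
  intro hand_text _ hpre
  unfold Spec_detect_preflop_allin detect_preflop_allin detect_preflop_allin_alt
  have hp : ∀ l ∈ (PySem.Str.split? hand_text "\n").getD [],
      pvHole l = true → pvFlop l = false ∧ pvAllin l = false := by
    intro l hl hh
    have := (List.all_eq_true.mp hpre) l hl
    simp [hh] at this
    exact ⟨this.1, this.2⟩
  rw [pv_scanA_false _ hp]
  cases hpidx : ((PySem.Str.split? hand_text "\n").getD []).findIdx? (fun l => pvHole l) with
  | none => simp [hpidx]
  | some h =>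
    simp only [hpidx]
    rw [PySem.List.slice_toNat _ (Int.natCast_nonneg _) (Int.natCast_nonneg _)]
    simp
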